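-- pv_equiv track=rewrite | github.com/Agent007little/daily_tasks | Adjacent repeated words in a string.py | count_adjacent_pairs
-- ===== SOURCE A (Python) =====
-- def count_adjacent_pairs(st):
--     st = st.lower()
--     st = st.split()
--     res = 0
--     i = 0
--     while i < len(st) - 1:
--         if st[i] == st[i + 1]:
--             res += 1
--             while i < len(st) - 1 and st[i] == st[i + 1]:
--                 i += 1
--         i += 1
--     return res
-- ===== SOURCE B (Python) =====
-- def count_adjacent_pairs(st):
--     w = st.lower().split()
--     return sum(1 for i in range(len(w) - 1)
--                if w[i] == w[i + 1] and (i == 0 or w[i - 1] != w[i]))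
-- ===== Notes on version B (the rewrite author's own statement) =====
-- stated objective: simpler
-- what changed: Replaces A's index-advancing nested while loops (outer scan plus inner run-skip) with a single flat pass that counts run starts: indices i with w[i]==w[i+1] whose predecessor differs.
import Mathlib
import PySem

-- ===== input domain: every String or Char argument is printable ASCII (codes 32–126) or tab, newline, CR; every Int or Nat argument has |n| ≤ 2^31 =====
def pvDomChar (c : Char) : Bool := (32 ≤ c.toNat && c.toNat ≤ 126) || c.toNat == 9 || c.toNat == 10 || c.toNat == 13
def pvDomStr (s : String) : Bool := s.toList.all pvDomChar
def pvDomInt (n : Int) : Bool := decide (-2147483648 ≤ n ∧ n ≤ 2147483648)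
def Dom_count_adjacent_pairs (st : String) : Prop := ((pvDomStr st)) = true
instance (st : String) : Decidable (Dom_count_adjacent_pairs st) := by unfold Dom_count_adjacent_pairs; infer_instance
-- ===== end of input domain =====

-- B replaces A's nested while loops (outer scan + inner run-skip) by one flat pass
-- counting run starts; objective: simpler. A is total, so there is no Pre_.

-- ===== PORT A =====
-- inner 'while i < len(st)-1 and st[i] == st[i+1]: i += 1' (returns the final i)
def pvSkipA (ws : List String) (i : Nat) : Nat :=
  if h : i < ws.length - 1 ∧ ws.getD i "" = ws.getD (i + 1) "" then
    pvSkipA ws (i + 1)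
  else i
termination_by ws.length - i
decreasing_by omega

theorem pvSkipA_le (ws : List String) (i : Nat) : i ≤ pvSkipA ws i := by
  unfold pvSkipA
  split
  · have := pvSkipA_le ws (i + 1); omega
  · exact Nat.le_refl i
termination_by ws.length - i
decreasing_by omega

-- outer while loop of A, state (i, res)
def pvLoopA (ws : List String) (i : Nat) (res : Int) : Int :=
  if h : i < ws.length - 1 then
    if ws.getD i "" = ws.getD (i + 1) "" then
      pvLoopA ws (pvSkipA ws i + 1) (res + 1)
    else
      pvLoopA ws (i + 1) res
  else res
termination_by ws.length - i
decreasing_by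
  · have := pvSkipA_le ws i; omega
  · omega

def count_adjacent_pairs (st : String) : Int :=
  pvLoopA (PySem.Str.split₀ (PySem.Str.lower st)) 0 0

-- ===== PORT B =====
-- sum(1 for i in range(len(w)-1) if w[i]==w[i+1] and (i==0 or w[i-1]!=w[i]))
def count_adjacent_pairs_alt (st : String) : Int :=
  let w := PySem.Str.split₀ (PySem.Str.lower st)
  (List.range (w.length - 1)).foldl
    (fun acc i =>
      if w.getD i "" = w.getD (i + 1) "" ∧ (i = 0 ∨ w.getD (i - 1) "" ≠ w.getD i "") then
        acc + 1
      else acc) 0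

-- ===== PRECONDITION & SPEC =====
def Spec_count_adjacent_pairs (st : String) (out : Int) : Prop := out = count_adjacent_pairs_alt st
instance (st : String) (out : Int) : Decidable (Spec_count_adjacent_pairs st out) := by unfold Spec_count_adjacent_pairs; infer_instance

-- ===== CLAIM (what is proved, stated in full; the proofs are below) =====
def Claim_equal_count_adjacent_pairs : Prop := ∀ (st : String), Dom_count_adjacent_pairs st → Spec_count_adjacent_pairs st (count_adjacent_pairs st)

-- ===== LEMMAS AND PROOFS =====

-- B's count, written as a recursion over the index (proof-side characterisation)
def pvF (ws : List String) (i : Nat) : Int :=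
  if i < ws.length - 1 then
    (if ws.getD i "" = ws.getD (i + 1) "" ∧ (i = 0 ∨ ws.getD (i - 1) "" ≠ ws.getD i "") then (1 : Int) else 0)
      + pvF ws (i + 1)
  else 0
termination_by ws.length - i
decreasing_by omega

theorem pvF_foldl (ws : List String) :
    ∀ (k i : Nat) (acc : Int), i + k = ws.length - 1 →
      (List.range' i k).foldl
        (fun acc j =>
          if ws.getD j "" = ws.getD (j + 1) "" ∧ (j = 0 ∨ ws.getD (j - 1) "" ≠ ws.getD j "") then
            acc + 1
          else acc) acc
      = acc + pvF ws i := by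
  intro k
  induction k with
  | zero =>
    intro i acc h
    rw [pvF]
    simp only [List.range', List.foldl_nil]
    rw [if_neg (by omega)]
    omega
  | succ k ih =>
    intro i acc h
    rw [List.range', List.foldl_cons, ih (i + 1) _ (by omega)]
    conv_rhs => rw [pvF]
    rw [if_pos (show i < ws.length - 1 by omega)]
    by_cases hc : ws.getD i "" = ws.getD (i + 1) "" ∧ (i = 0 ∨ ws.getD (i - 1) "" ≠ ws.getD i "")
    · rw [if_pos hc, if_pos hc]; ring
    · rw [if_neg hc, if_neg hc]; ring

-- after the inner while, the loop condition fails at the final index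
theorem pvSkipA_stop (ws : List String) (i : Nat) :
    ¬ (pvSkipA ws i < ws.length - 1 ∧ ws.getD (pvSkipA ws i) "" = ws.getD (pvSkipA ws i + 1) "") := by
  unfold pvSkipA
  split
  · exact pvSkipA_stop ws (i + 1)
  · next h => simpa using h
termination_by ws.length - i
decreasing_by omega

-- every index strictly before the final one satisfied the inner condition
theorem pvSkipA_chain (ws : List String) (i : Nat) :
    ∀ j, i ≤ j → j < pvSkipA ws i →
      j < ws.length - 1 ∧ ws.getD j "" = ws.getD (j + 1) "" := by
  intro j hij hj
  rw [pvSkipA] at hj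
  split at hj
  · next h =>
    rcases Nat.eq_or_lt_of_le hij with rfl | hlt
    · exact h
    · exact pvSkipA_chain ws (i + 1) j hlt hj
  · omega
termination_by ws.length - i
decreasing_by omega

theorem pvSkipA_eq_of_cond (ws : List String) (i : Nat)
    (h : i < ws.length - 1 ∧ ws.getD i "" = ws.getD (i + 1) "") :
    pvSkipA ws i = pvSkipA ws (i + 1) := by
  rw [pvSkipA, dif_pos h]

-- pvF is constant across the interior of a run up to one past its end
theorem pvF_run (ws : List String) (b s : Nat)
    (hstop : ¬ (s < ws.length - 1 ∧ ws.getD s "" = ws.getD (s + 1) ""))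
    (hchain : ∀ j, b ≤ j → j < s → j < ws.length - 1 ∧ ws.getD j "" = ws.getD (j + 1) "") :
    ∀ j, b < j → j ≤ s → pvF ws j = pvF ws (s + 1) := by
  intro j hj0 hjs
  rcases Nat.eq_or_lt_of_le hjs with heq2 | hlt
  · -- j = s : the condition's first conjunct fails (or we are past the end)
    rw [heq2, pvF]
    by_cases hs : s < ws.length - 1
    · have hne : ws.getD s "" ≠ ws.getD (s + 1) "" := fun he => hstop ⟨hs, he⟩
      rw [if_pos hs, if_neg (by tauto)]
      omega
    · rw [if_neg hs, pvF, if_neg (by omega)]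
  · -- j < s : interior of the run, predecessor equals w[j], so nothing is counted
    have hj := hchain j (by omega) hlt
    have hjm : ws.getD (j - 1) "" = ws.getD j "" := by
      have := hchain (j - 1) (by omega) (by omega)
      have hj1 : j - 1 + 1 = j := by omega
      rw [hj1] at this
      exact this.2
    rw [pvF, if_pos hj.1, if_neg (by
      rintro ⟨-, h0 | hne⟩
      · omega
      · exact hne hjm)]
    have := pvF_run ws b s hstop hchain (j + 1) (by omega) (by omega)
    rw [this]; ring
termination_by j => s - j
decreasing_by omega

-- loop invariant: we only ever stand at 0, past the end, or at a fresh run boundary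
theorem pvLoopA_eq_pvF (ws : List String) :
    ∀ (i : Nat) (res : Int),
      (i = 0 ∨ ws.length - 1 ≤ i ∨ ws.getD (i - 1) "" ≠ ws.getD i "") →
      pvLoopA ws i res = res + pvF ws i := by
  intro i res hinv
  rw [pvLoopA, pvF]
  by_cases h : i < ws.length - 1
  · rw [dif_pos h, if_pos h]
    by_cases heq : ws.getD i "" = ws.getD (i + 1) ""
    · rw [if_pos heq]
      have hskip := pvSkipA_eq_of_cond ws i ⟨h, heq⟩
      have hle : i + 1 ≤ pvSkipA ws i := hskip ▸ pvSkipA_le ws (i + 1)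
      set s := pvSkipA ws i with hs
      have hstop := pvSkipA_stop ws i
      have hchain : ∀ j, i ≤ j → j < s → j < ws.length - 1 ∧ ws.getD j "" = ws.getD (j + 1) "" :=
        fun j hij hj => pvSkipA_chain ws i j hij hj
      have hrun := pvF_run ws i s hstop hchain (i + 1) (by omega) hle
      have hinv' : s + 1 = 0 ∨ ws.length - 1 ≤ s + 1 ∨ ws.getD (s + 1 - 1) "" ≠ ws.getD (s + 1) "" := by
        rcases (not_and_or.mp hstop) with hge | hne
        · right; left; omega
        · right; right; simpa using hne
      have hIH := pvLoopA_eq_pvF ws (s + 1) (res + 1) hinv'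
      have hc2 : i = 0 ∨ ws.getD (i - 1) "" ≠ ws.getD i "" := by
        rcases hinv with h0 | hgi | hne
        · exact Or.inl h0
        · exact absurd hgi (by omega)
        · exact Or.inr hne
      rw [hIH, ← hrun, if_pos ⟨heq, hc2⟩]
      ring
    · rw [if_neg heq, if_neg (by tauto)]
      have := pvLoopA_eq_pvF ws (i + 1) res (by right; right; simpa using heq)
      rw [this]; ring
  · rw [dif_neg h, if_neg h]; ring
termination_by i => ws.length - i
decreasing_by
  · have := pvSkipA_le ws i; omega
  · omega

-- ===== VERDICT (by name: the statement is the Claim_ definition above) =====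
theorem count_adjacent_pairs_spec : Claim_equal_count_adjacent_pairs := by
  intro st _
  unfold Spec_count_adjacent_pairs count_adjacent_pairs count_adjacent_pairs_alt
  set ws := PySem.Str.split₀ (PySem.Str.lower st) with hws
  have hB := pvF_foldl ws (ws.length - 1) 0 0 (by omega)
  rw [← List.range_eq_range'] at hB
  rw [pvLoopA_eq_pvF ws 0 0 (Or.inl rfl), hB]
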